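-- pv_equiv track=rewrite | github.com/scey26/srdualglow | SRFlow_seungjae/code/test_jm_srdualglow.py | calc_inp_shapes
-- ===== SOURCE A (Python) =====
-- def calc_inp_shapes(n_channels, image_size, n_blocks):
--     # calculates z shapes (inputs) after SQUEEZE operation (before Block operations) - e.g. channels: 12, 24, 48, 96
--     def calc_z_shapes(n_channel, image_size, n_block):
--         # calculates shapes of z's after SPLIT operation (after Block operations) - e.g. channels: 6, 12, 24, 96
--         z_shapes = []
--         for i in range(n_block - 1):
--             image_size = (image_size[0] // 2, image_size[1] // 2)
--             n_channel = n_channel * 2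
--
--             shape = (n_channel, *image_size)
--             z_shapes.append(shape)
--
--         # for the very last block where we have no split operation
--         image_size = (image_size[0] // 2, image_size[1] // 2)
--         shape = (n_channel * 4, *image_size)
--         z_shapes.append(shape)
--         return z_shapes
--
--     z_shapes = calc_z_shapes(n_channels, image_size, n_blocks)
--     input_shapes = []
--     for i in range(len(z_shapes)):
--         if i < len(z_shapes) - 1:
--             channels = z_shapes[i][0] * 2
--             input_shapes.append((channels, z_shapes[i][1], z_shapes[i][2]))
--         else:
--             input_shapes.append((z_shapes[i][0], z_shapes[i][1], z_shapes[i][2]))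
--     return input_shapes
-- ===== SOURCE B (Python) =====
-- def calc_inp_shapes(n_channels, image_size, n_blocks):
--     # One pass: emit each block's input shape directly (no intermediate z-shapes
--     # list, no second transform pass); pw tracks the running power of two.
--     w, h = image_size
--     shapes = []
--     pw = 1
--     for _ in range(n_blocks - 1):
--         pw *= 2
--         shapes.append((n_channels * pw * 2, w // pw, h // pw))
--     # final block: x4 channels, one more halving (present even when n_blocks <= 0)
--     shapes.append((n_channels * pw * 4, w // (pw * 2), h // (pw * 2)))
--     return shapes
-- ===== Notes on version B (the rewrite author's own statement) =====
-- stated objective: simpler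
-- what changed: B replaces A's two passes (build the z-shapes list by iterated halving/doubling, then re-walk it by index to double all but the last channel) with one pass that emits each input shape directly from a closed-form power-of-two formula.
import Mathlib
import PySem

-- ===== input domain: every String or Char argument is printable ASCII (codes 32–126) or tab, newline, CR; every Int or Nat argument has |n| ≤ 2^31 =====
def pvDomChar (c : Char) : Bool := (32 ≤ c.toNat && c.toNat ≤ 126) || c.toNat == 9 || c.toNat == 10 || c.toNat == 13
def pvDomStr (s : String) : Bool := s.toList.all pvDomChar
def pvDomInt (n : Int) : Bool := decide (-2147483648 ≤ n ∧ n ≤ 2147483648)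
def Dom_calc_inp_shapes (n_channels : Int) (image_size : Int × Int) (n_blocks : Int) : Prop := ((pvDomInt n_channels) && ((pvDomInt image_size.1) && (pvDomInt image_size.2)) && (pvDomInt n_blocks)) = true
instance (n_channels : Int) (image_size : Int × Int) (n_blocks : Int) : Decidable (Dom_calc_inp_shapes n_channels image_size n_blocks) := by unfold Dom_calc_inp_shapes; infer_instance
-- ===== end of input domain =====

-- B computes each shape by a closed formula in one pass instead of A's build-then-transform
-- two passes; same return value (objective: simpler).

-- ===== PORT A =====
-- inner helper calc_z_shapes, transliterated: the loop state is (image_size, n_channel, z_shapes)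
def calc_z_shapes_A (n_channel : Int) (image_size : Int × Int) (n_block : Int) :
    List (Int × Int × Int) :=
  let s := (PySem.List.pyRange 0 (n_block - 1) 1).foldl
    (fun (st : (Int × Int) × Int × List (Int × Int × Int)) _ =>
      let isz := (PySem.Int.floordiv st.1.1 2, PySem.Int.floordiv st.1.2 2)
      let ch := st.2.1 * 2
      (isz, ch, st.2.2 ++ [(ch, isz.1, isz.2)]))
    (image_size, n_channel, [])
  let isz := (PySem.Int.floordiv s.1.1 2, PySem.Int.floordiv s.1.2 2)
  s.2.2 ++ [(s.2.1 * 4, isz.1, isz.2)]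

def calc_inp_shapes (n_channels : Int) (image_size : Int × Int) (n_blocks : Int) : List (Int × Int × Int) :=
  let z_shapes := calc_z_shapes_A n_channels image_size n_blocks
  (PySem.List.pyRange 0 (z_shapes.length : Int) 1).foldl
    (fun acc i =>
      let zi := PySem.List.pyGetD z_shapes i (0, 0, 0)   -- index always in range
      if i < (z_shapes.length : Int) - 1 then
        acc ++ [(zi.1 * 2, zi.2.1, zi.2.2)]
      else
        acc ++ [(zi.1, zi.2.1, zi.2.2)])
    []

-- ===== PORT B =====
def calc_inp_shapes_alt (n_channels : Int) (image_size : Int × Int) (n_blocks : Int) : List (Int × Int × Int) :=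
  let w := image_size.1
  let h := image_size.2
  let s := (PySem.List.pyRange 0 (n_blocks - 1) 1).foldl
    (fun (st : Int × List (Int × Int × Int)) _ =>
      let pw := st.1 * 2
      (pw, st.2 ++ [(n_channels * pw * 2, PySem.Int.floordiv w pw, PySem.Int.floordiv h pw)]))
    (1, [])
  s.2 ++ [(n_channels * s.1 * 4,
           PySem.Int.floordiv w (s.1 * 2), PySem.Int.floordiv h (s.1 * 2))]

-- ===== PRECONDITION & SPEC =====
def Spec_calc_inp_shapes (n_channels : Int) (image_size : Int × Int) (n_blocks : Int) (out : List (Int × Int × Int)) : Prop := out = calc_inp_shapes_alt n_channels image_size n_blocks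
instance (n_channels : Int) (image_size : Int × Int) (n_blocks : Int) (out : List (Int × Int × Int)) : Decidable (Spec_calc_inp_shapes n_channels image_size n_blocks out) := by unfold Spec_calc_inp_shapes; infer_instance

-- ===== CLAIM (what is proved, stated in full; the proofs are below) =====
def Claim_equal_calc_inp_shapes : Prop := ∀ (n_channels : Int) (image_size : Int × Int) (n_blocks : Int), Dom_calc_inp_shapes n_channels image_size n_blocks → Spec_calc_inp_shapes n_channels image_size n_blocks (calc_inp_shapes n_channels image_size n_blocks)

-- ===== LEMMAS AND PROOFS =====

theorem pv_fd_fd (x a b : Int) (ha : 0 < a) (hb : 0 < b) :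
    PySem.Int.floordiv (PySem.Int.floordiv x a) b = PySem.Int.floordiv x (a * b) := by
  rw [PySem.Int.floordiv_eq_ediv_of_pos ha, PySem.Int.floordiv_eq_ediv_of_pos hb,
      PySem.Int.floordiv_eq_ediv_of_pos (mul_pos ha hb),
      Int.ediv_ediv_of_nonneg ha.le]

-- closed form of A's z-shapes loop (the fold ignores the range elements)
theorem pv_zloop (l : List Int) (w h c : Int) (zs : List (Int × Int × Int)) :
    l.foldl
      (fun (st : (Int × Int) × Int × List (Int × Int × Int)) _ =>
        let isz := (PySem.Int.floordiv st.1.1 2, PySem.Int.floordiv st.1.2 2)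
        let ch := st.2.1 * 2
        (isz, ch, st.2.2 ++ [(ch, isz.1, isz.2)]))
      ((w, h), c, zs) =
    ((PySem.Int.floordiv w (2 ^ l.length), PySem.Int.floordiv h (2 ^ l.length)),
      c * 2 ^ l.length,
      zs ++ (List.range l.length).map (fun j =>
        (c * 2 ^ (j + 1), PySem.Int.floordiv w (2 ^ (j + 1)),
          PySem.Int.floordiv h (2 ^ (j + 1))))) := by
  induction l generalizing w h c zs with
  | nil => simp
  | cons a l ih =>
      simp only [List.foldl_cons]
      rw [ih]
      have h2 : ∀ (x : Int) (k : Nat),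
          PySem.Int.floordiv (PySem.Int.floordiv x 2) (2 ^ k) = PySem.Int.floordiv x (2 ^ (k + 1)) := by
        intro x k
        rw [pv_fd_fd x 2 (2 ^ k) (by norm_num) (by positivity)]
        congr 1
        rw [pow_succ]; ring
      refine Prod.ext (Prod.ext ?_ ?_) (Prod.ext ?_ ?_)
      · exact h2 w l.length
      · exact h2 h l.length
      · show c * 2 * 2 ^ l.length = c * 2 ^ (l.length + 1)
        rw [pow_succ]; ring
      · show zs ++ [(c * 2, PySem.Int.floordiv w 2, PySem.Int.floordiv h 2)] ++ _ = _
        simp only [List.length_cons, List.range_succ_eq_map, List.map_cons, List.map_map]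
        rw [List.append_assoc, List.singleton_append]
        congr 1
        congr 1
        apply List.map_congr_left
        intro j _
        simp only [Function.comp, Nat.succ_eq_add_one]
        refine Prod.ext ?_ (Prod.ext ?_ ?_)
        · show c * 2 * 2 ^ (j + 1) = c * 2 ^ (j + 1 + 1)
          rw [pow_succ]; ring
        · exact h2 w (j + 1)
        · exact h2 h (j + 1)

-- a fold appending one element per step is a map
theorem pv_foldl_app {α β : Type} (G : α → β) (l : List α) (init : List β) :
    l.foldl (fun acc x => acc ++ [G x]) init = init ++ l.map G := by
  induction l generalizing init with
  | nil => simp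
  | cons a l ih => simp [ih]

-- closed form of A's second (transform) loop, on any list of shape zs ++ [last]
theorem pv_loop2 (zs : List (Int × Int × Int)) (last : Int × Int × Int) :
    (PySem.List.pyRange 0 ((zs ++ [last]).length : Int) 1).foldl
      (fun acc i =>
        let zi := PySem.List.pyGetD (zs ++ [last]) i ((0 : Int), (0 : Int), (0 : Int))
        if i < ((zs ++ [last]).length : Int) - 1 then
          acc ++ [(zi.1 * 2, zi.2.1, zi.2.2)]
        else
          acc ++ [(zi.1, zi.2.1, zi.2.2)]) [] =
    zs.map (fun z => (z.1 * 2, z.2.1, z.2.2)) ++ [last] := by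
  have hfun : (fun (acc : List (Int × Int × Int)) (i : Int) =>
        let zi := PySem.List.pyGetD (zs ++ [last]) i ((0 : Int), (0 : Int), (0 : Int))
        if i < ((zs ++ [last]).length : Int) - 1 then
          acc ++ [(zi.1 * 2, zi.2.1, zi.2.2)]
        else
          acc ++ [(zi.1, zi.2.1, zi.2.2)]) =
      (fun acc i =>
        acc ++ [let zi := PySem.List.pyGetD (zs ++ [last]) i ((0 : Int), (0 : Int), (0 : Int))
                if i < ((zs ++ [last]).length : Int) - 1 then
                  (zi.1 * 2, zi.2.1, zi.2.2)
                else
                  (zi.1, zi.2.1, zi.2.2)]) := by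
    funext acc i
    by_cases h : i < ((zs ++ [last]).length : Int) - 1
    · rw [if_pos h, if_pos h]
    · rw [if_neg h, if_neg h]
  rw [hfun, pv_foldl_app, List.nil_append,
      PySem.List.pyRange_one 0 ((zs ++ [last]).length : Int)]
  have hL : (((zs ++ [last]).length : Int) - 0).toNat = zs.length + 1 := by
    simp
  rw [hL, List.map_map, List.range_succ, List.map_append]
  congr 1
  · -- the first zs.length indices hit zs and take the doubling branch
    apply List.ext_getElem (by simp)
    intro k hk _
    simp only [List.getElem_map, List.getElem_range, Function.comp]
    have hk' : k < zs.length := by simpa using hk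
    have hget : PySem.List.pyGetD (zs ++ [last]) ((0 : Int) + (k : Int))
        ((0 : Int), (0 : Int), (0 : Int)) = zs[k] := by
      have : (0 : Int) + (k : Int) = ((k : Nat) : Int) := by ring
      rw [this, PySem.List.pyGetD_natCast]
      simp [List.getD, List.getElem?_append_left hk', List.getElem?_eq_getElem hk']
    simp only [hget] at *
    simp [hk']
  · -- the last index hits last and keeps it unchanged
    simp only [List.map_cons, List.map_nil, Function.comp]
    simp

-- closed form of B's single loop (the fold ignores the range elements)
theorem pv_bloop (l : List Int) (c w h pw : Int) (acc : List (Int × Int × Int)) :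
    l.foldl
      (fun (st : Int × List (Int × Int × Int)) _ =>
        let pw' := st.1 * 2
        (pw', st.2 ++ [(c * pw' * 2, PySem.Int.floordiv w pw', PySem.Int.floordiv h pw')]))
      (pw, acc) =
    (pw * 2 ^ l.length,
      acc ++ (List.range l.length).map (fun j =>
        (c * (pw * 2 ^ (j + 1)) * 2, PySem.Int.floordiv w (pw * 2 ^ (j + 1)),
          PySem.Int.floordiv h (pw * 2 ^ (j + 1))))) := by
  induction l generalizing pw acc with
  | nil => simp
  | cons a l ih =>
      simp only [List.foldl_cons]
      rw [ih]
      refine Prod.ext ?_ ?_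
      · show pw * 2 * 2 ^ l.length = pw * 2 ^ (l.length + 1)
        rw [pow_succ]; ring
      · show acc ++ [(c * (pw * 2) * 2, PySem.Int.floordiv w (pw * 2), PySem.Int.floordiv h (pw * 2))] ++ _ = _
        simp only [List.length_cons, List.range_succ_eq_map, List.map_cons, List.map_map]
        rw [List.append_assoc, List.singleton_append]
        congr 1
        congr 1
        apply List.map_congr_left
        intro j _
        simp only [Function.comp, Nat.succ_eq_add_one]
        have hp : pw * 2 * 2 ^ (j + 1) = pw * 2 ^ (j + 1 + 1) := by rw [pow_succ]; ring
        refine Prod.ext ?_ (Prod.ext ?_ ?_) <;> rw [hp]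

-- ===== VERDICT (by name: the statement is the Claim_ definition above) =====
theorem calc_inp_shapes_spec : Claim_equal_calc_inp_shapes := by
  intro c sz n _
  unfold Spec_calc_inp_shapes calc_inp_shapes calc_z_shapes_A calc_inp_shapes_alt
  rw [pv_zloop]
  simp only [List.nil_append]
  set w := sz.1
  set h := sz.2
  set m := (PySem.List.pyRange 0 (n - 1) 1).length with hm
  have h2 : ∀ (x : Int),
      PySem.Int.floordiv (PySem.Int.floordiv x (2 ^ m)) 2 = PySem.Int.floordiv x (2 ^ (m + 1)) := by
    intro x
    rw [pv_fd_fd x (2 ^ m) 2 (by positivity) (by norm_num), pow_succ]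
  simp only [h2]
  rw [pv_loop2 ((List.range m).map (fun j =>
        (c * 2 ^ (j + 1), PySem.Int.floordiv w (2 ^ (j + 1)), PySem.Int.floordiv h (2 ^ (j + 1)))))
      (c * 2 ^ m * 4, PySem.Int.floordiv w (2 ^ (m + 1)), PySem.Int.floordiv h (2 ^ (m + 1)))]
  rw [pv_bloop]
  simp only [List.nil_append, one_mul, List.map_map]
  rw [← hm, pow_succ]
  rfl
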